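-- pv_equiv track=rewrite | github.com/pold8/Virtual-Memory-Simulator | simulator/replacement_policies/lru.py | select_victim
-- ===== SOURCE A (Python) =====
-- from typing import Optional
--
-- def select_victim(
--
--     frames: list[Optional[int]],
--     reference_string: list[int],
--     current_index: int,
-- ) -> int:
--     """
--     :param frames: list of current page numbers in frames (no Nones, memory is full)
--     :param reference_string: full sequence of page references
--     :param current_index: index in reference_string of the *current* faulting access
--     :return: index of frame to evict
--     """
--     # Index of frame whose page was least recently used
--     victim_frame = 0
--     oldest_distance = -1  # how many steps ago it was last used
--
--     for frame_index, page in enumerate(frames):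
--         if page is None:
--             # Shouldn't happen when memory is full, but be safe
--             return frame_index
--
--         # Search backwards to find the last time this page was referenced
--         last_use_index = -1
--         for i in range(current_index - 1, -1, -1):
--             if reference_string[i] == page:
--                 last_use_index = i
--                 break
--
--         if last_use_index == -1:
--             # Page was never used before -> it's the best victim
--             return frame_index
--
--         distance = current_index - last_use_index
--
--         if distance > oldest_distance:
--             oldest_distance = distance
--             victim_frame = frame_index
--
--     return victim_frame
-- ===== SOURCE B (Python) =====
-- def select_victim(frames, reference_string, current_index):
--     # Build page -> first frame holding it, and the first empty frame (if any).
--     first_holder = {}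
--     none_frame = None
--     for f in range(len(frames)):
--         p = frames[f]
--         if p is None:
--             if none_frame is None:
--                 none_frame = f
--         else:
--             first_holder.setdefault(p, f)
--
--     # Backward sweep over the referenced history: pop each page at its last use.
--     # The frame popped last (smallest last-use index) is the LRU candidate.
--     victim = 0
--     for i in range(min(current_index, len(reference_string)) - 1, -1, -1):
--         if not first_holder:
--             break
--         p = reference_string[i]
--         if p in first_holder:
--             victim = first_holder.pop(p)
--
--     # Frames never referenced (or empty) beat every referenced frame; first wins.
--     survivors = list(first_holder.values())
--     if none_frame is not None:
--         survivors.append(none_frame)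
--     if survivors:
--         return min(survivors)
--     return victim
-- ===== Notes on version B (the rewrite author's own statement) =====
-- stated objective: alternative
-- what changed: Replaced A's per-frame backward scans of the reference string and best-distance accumulator loop by the reverse-elimination LRU trick: build page->first-holding-frame (and first empty frame) once, then a single backward sweep over the referenced history pops each page at its last use, so the frame popped last (or the first never-referenced/empty frame) is the victim.
import Mathlib
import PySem

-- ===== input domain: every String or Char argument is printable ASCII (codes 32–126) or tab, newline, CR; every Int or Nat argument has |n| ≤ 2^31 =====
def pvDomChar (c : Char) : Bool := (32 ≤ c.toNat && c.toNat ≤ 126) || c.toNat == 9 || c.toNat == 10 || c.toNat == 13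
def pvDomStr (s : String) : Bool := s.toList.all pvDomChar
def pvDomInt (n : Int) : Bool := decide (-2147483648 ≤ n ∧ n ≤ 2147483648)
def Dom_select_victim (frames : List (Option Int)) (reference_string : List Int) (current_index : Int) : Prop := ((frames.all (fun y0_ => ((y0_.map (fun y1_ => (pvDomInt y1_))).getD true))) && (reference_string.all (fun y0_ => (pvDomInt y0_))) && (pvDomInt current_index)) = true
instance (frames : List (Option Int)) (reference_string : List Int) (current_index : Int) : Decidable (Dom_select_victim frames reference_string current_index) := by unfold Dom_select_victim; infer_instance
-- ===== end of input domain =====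

-- B replaces A's per-frame backward scans and best-distance frame loop by the reverse-elimination
-- LRU trick: build page -> first holding frame once, then one backward sweep over the referenced
-- history pops each page at its last use; the frame popped last (or the first never-referenced /
-- empty frame) is the victim.

-- ===== PORT A =====

-- inner loop: 'for i in range(current_index-1, -1, -1): if reference_string[i] == page: last_use_index = i; break'
-- (where Python would raise IndexError — pyGet? = none, only outside Pre_ — we continue the scan)
def svFindLast (rs : List Int) (page : Int) : List Int → Int
  | [] => -1
  | i :: rest => if PySem.List.pyGet? rs i = some page then i else svFindLast rs page rest

-- outer loop over frames with accumulators (victim_frame, oldest_distance)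
def svGoA (rs : List Int) (ci : Int) : List (Option Int) → Int → Int → Int → Int
  | [], _, victim, _ => victim
  | none :: _, idx, _, _ => idx
  | some page :: rest, idx, victim, oldest =>
    let lu := svFindLast rs page (PySem.List.pyRange (ci - 1) (-1) (-1))
    if lu = -1 then idx
    else if ci - lu > oldest then svGoA rs ci rest (idx + 1) idx (ci - lu)
    else svGoA rs ci rest (idx + 1) victim oldest

def select_victim (frames : List (Option Int)) (reference_string : List Int) (current_index : Int) : Int :=
  svGoA reference_string current_index frames 0 0 (-1)

-- ===== PORT B =====

-- 'for f in range(len(frames)): p = frames[f]; if p is None: (record first) else first_holder.setdefault(p, f)'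
def svBuildFH (frames : List (Option Int)) : PySem.Dict Int Int × Option Int :=
  (PySem.List.pyRange 0 (frames.length : Int) 1).foldl
    (fun st f =>
      match PySem.List.pyGetD frames f none with
      | none => (st.1, if st.2 = none then some f else st.2)
      | some p => (st.1.setdefault p f, st.2))
    (PySem.Dict.empty, none)

-- backward sweep: 'for i in range(min(ci, len(rs)) - 1, -1, -1): if not fh: break;
--                  p = rs[i]; if p in fh: victim = fh.pop(p)'
-- (indices in this clamped range are always valid, so pyGetD's default is never used)
def svSweep (rs : List Int) : List Int → PySem.Dict Int Int → Int → PySem.Dict Int Int × Int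
  | [], d, v => (d, v)
  | i :: rest, d, v =>
    if d.size = 0 then (d, v)
    else
      match d.pop? (PySem.List.pyGetD rs i 0) with
      | some fd => svSweep rs rest fd.2 fd.1
      | none => svSweep rs rest d v

def select_victim_alt (frames : List (Option Int)) (reference_string : List Int) (current_index : Int) : Int :=
  let st := svBuildFH frames
  let sw := svSweep reference_string
      (PySem.List.pyRange (min current_index (reference_string.length : Int) - 1) (-1) (-1)) st.1 0
  let survivors := sw.1.values ++ (match st.2 with | none => ([] : List Int) | some f => [f])
  match PySem.List.min? survivors (fun x => x) with
  | some m => m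
  | none => sw.2

-- ===== PRECONDITION & SPEC =====
-- A raises IndexError exactly when current_index > len(reference_string) and the first frame holds a page;
-- Pre_ excludes precisely those inputs (it admits every input on which A returns).
def Pre_select_victim (frames : List (Option Int)) (reference_string : List Int) (current_index : Int) : Prop :=
  current_index ≤ (reference_string.length : Int) ∨ frames = [] ∨ frames.head? = some none
instance (frames : List (Option Int)) (reference_string : List Int) (current_index : Int) : Decidable (Pre_select_victim frames reference_string current_index) := by unfold Pre_select_victim; infer_instance

def pvWitness_select_victim : List (Option Int) × List Int × Int := ([some 1, some 2], [1, 2], 2)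

def Spec_select_victim (frames : List (Option Int)) (reference_string : List Int) (current_index : Int) (out : Int) : Prop := out = select_victim_alt frames reference_string current_index
instance (frames : List (Option Int)) (reference_string : List Int) (current_index : Int) (out : Int) : Decidable (Spec_select_victim frames reference_string current_index out) := by unfold Spec_select_victim; infer_instance

-- ===== CLAIM (what is proved, stated in full; the proofs are below) =====
def Claim_equal_select_victim : Prop := ∀ (frames : List (Option Int)) (reference_string : List Int) (current_index : Int), Dom_select_victim frames reference_string current_index → Pre_select_victim frames reference_string current_index → Spec_select_victim frames reference_string current_index (select_victim frames reference_string current_index)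

-- ===== LEMMAS AND PROOFS =====

-- ---- the common abstract description: last use of a page, bad/ key of a frame slot, and the selection spec ----

-- last use of page p in rs[0:ci] as A's backward scan computes it
def pvL (rs : List Int) (ci : Int) (p : Int) : Int :=
  svFindLast rs p (PySem.List.pyRange (ci - 1) (-1) (-1))

def pvPage (fs : List (Option Int)) (i : Nat) : Option Int := (fs[i]?).getD none

-- a frame slot is "bad" when it is empty or its page was never referenced: A returns the first such index
def pvBad (rs : List Int) (ci : Int) (fs : List (Option Int)) (i : Nat) : Prop :=
  pvPage fs i = none ∨ pvL rs ci ((pvPage fs i).getD 0) = -1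

def pvKey (rs : List Int) (ci : Int) (fs : List (Option Int)) (i : Nat) : Int :=
  pvL rs ci ((pvPage fs i).getD 0)

-- the unique answer: 0 for no frames, else the first bad frame, else the first frame of minimal last use
def pvSel (rs : List Int) (ci : Int) (fs : List (Option Int)) (r : Int) : Prop :=
  (fs = [] ∧ r = 0) ∨
  (∃ j : Nat, j < fs.length ∧ r = (j : Int) ∧ pvBad rs ci fs j ∧ ∀ i < j, ¬ pvBad rs ci fs i) ∨
  ((∀ i < fs.length, ¬ pvBad rs ci fs i) ∧ fs ≠ [] ∧
    ∃ j : Nat, j < fs.length ∧ r = (j : Int) ∧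
      (∀ i < fs.length, pvKey rs ci fs j ≤ pvKey rs ci fs i) ∧
      (∀ i < j, pvKey rs ci fs j < pvKey rs ci fs i))

@[simp] lemma pvPage_cons_succ (x : Option Int) (t : List (Option Int)) (i : Nat) :
    pvPage (x :: t) (i + 1) = pvPage t i := by simp [pvPage]

@[simp] lemma pvPage_cons_zero (x : Option Int) (t : List (Option Int)) :
    pvPage (x :: t) 0 = x := by simp [pvPage]

lemma pvBad_cons_succ (rs : List Int) (ci : Int) (x : Option Int) (t : List (Option Int)) (i : Nat) :
    pvBad rs ci (x :: t) (i + 1) ↔ pvBad rs ci t i := by simp [pvBad]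

lemma pvKey_cons_succ (rs : List Int) (ci : Int) (x : Option Int) (t : List (Option Int)) (i : Nat) :
    pvKey rs ci (x :: t) (i + 1) = pvKey rs ci t i := by simp [pvKey]

-- ---- facts about pvL ----

lemma pvL_neg (rs : List Int) {ci : Int} (h : ci ≤ 0) (p : Int) : pvL rs ci p = -1 := by
  simp [pvL, PySem.List.pyRange_neg_one_eq_nil (by omega : ci - 1 ≤ -1), svFindLast]
lemma pvL_succ (rs : List Int) (k : Nat) (hk : k < rs.length) (p : Int) :
    pvL rs ((k : Int) + 1) p = if rs[k] = p then (k : Int) else pvL rs (k : Int) p := by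
  have h1 : ((k : Int) + 1 - 1) = (k : Int) := by ring
  have h2 : (-1 : Int) < (k : Int) := by omega
  rw [pvL, h1, PySem.List.pyRange_neg_one_cons h2]
  have h3 : PySem.List.pyGet? rs (k : Int) = some rs[k] := by
    rw [PySem.List.pyGet?_eq_some_getElem rs (by omega) (by exact_mod_cast hk)]
    simp
  simp only [svFindLast, h3, pvL]
  by_cases h : rs[k] = p
  · simp [h]
  · simp [h]

lemma pvL_cases_nat (rs : List Int) (k : Nat) (hk : k ≤ rs.length) (p : Int) :
    pvL rs (k : Int) p = -1 ∨
    ∃ i : Nat, i < k ∧ pvL rs (k : Int) p = (i : Int) ∧ rs[i]? = some p := by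
  induction k with
  | zero => left; exact pvL_neg rs (by omega) p
  | succ n ih =>
    have hn : n < rs.length := by omega
    have := pvL_succ rs n hn p
    push_cast at this ⊢
    rw [this]
    by_cases h : rs[n] = p
    · right; exact ⟨n, by omega, by simp [h], by rw [List.getElem?_eq_getElem hn, h]⟩
    · rcases ih (by omega) with h' | ⟨i, hi, h1, h2⟩
      · left; simp [h, h']
      · right; exact ⟨i, by omega, by simp [h, h1], h2⟩

lemma pvL_ge_nat (rs : List Int) (k : Nat) (hk : k ≤ rs.length) {i : Nat} {p : Int}
    (h1 : i < k) (h2 : rs[i]? = some p) : (i : Int) ≤ pvL rs (k : Int) p := by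
  induction k with
  | zero => omega
  | succ n ih =>
    have hn : n < rs.length := by omega
    have hs := pvL_succ rs n hn p
    push_cast at hs ⊢
    rw [hs]
    by_cases h : rs[n] = p
    · simp [h]; omega
    · have hin : i < n := by
        rcases Nat.lt_succ_iff_lt_or_eq.mp h1 with h' | h'
        · exact h'
        · subst h'; rw [List.getElem?_eq_getElem hn] at h2
          exact absurd (Option.some.inj h2) h
      simp [h]
      exact ih (by omega) hin

lemma pvL_cases (rs : List Int) {ci : Int} (hci : ci ≤ (rs.length : Int)) (p : Int) :
    pvL rs ci p = -1 ∨
    ∃ i : Nat, (i : Int) < ci ∧ pvL rs ci p = (i : Int) ∧ rs[i]? = some p := by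
  by_cases h : ci ≤ 0
  · left; exact pvL_neg rs h p
  · have hc : ci = (ci.toNat : Int) := by omega
    rw [hc]
    rcases pvL_cases_nat rs ci.toNat (by omega) p with h' | ⟨i, hi, h1, h2⟩
    · left; exact h'
    · right; exact ⟨i, by omega, h1, h2⟩

lemma pvL_ge (rs : List Int) {ci : Int} (hci : ci ≤ (rs.length : Int)) {i : Nat} {p : Int}
    (h1 : (i : Int) < ci) (h2 : rs[i]? = some p) : (i : Int) ≤ pvL rs ci p := by
  have hc : ci = (ci.toNat : Int) := by omega
  rw [hc]
  exact pvL_ge_nat rs ci.toNat (by omega) (by omega) h2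

lemma pvL_inj (rs : List Int) {ci : Int} (hci : ci ≤ (rs.length : Int)) {p q : Int}
    (hp : pvL rs ci p ≠ -1) (hq : pvL rs ci q ≠ -1) (h : pvL rs ci p = pvL rs ci q) : p = q := by
  rcases pvL_cases rs hci p with h1 | ⟨i, hi, h1, h2⟩
  · exact absurd h1 hp
  rcases pvL_cases rs hci q with h3 | ⟨j, hj, h3, h4⟩
  · exact absurd h3 hq
  rw [h1, h3] at h
  have : i = j := by omega
  subst this
  rw [h2] at h4
  exact Option.some.inj h4

lemma pvRange_toNat (ci : Int) :
    PySem.List.pyRange (ci - 1) (-1) (-1) = PySem.List.pyRange ((ci.toNat : Int) - 1) (-1) (-1) := by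
  by_cases h : 0 < ci
  · congr 1; omega
  · rw [PySem.List.pyRange_neg_one_eq_nil (by omega), PySem.List.pyRange_neg_one_eq_nil (by omega)]

lemma pvL_toNat (rs : List Int) (ci : Int) (p : Int) : pvL rs ci p = pvL rs (ci.toNat : Int) p := by
  simp [pvL, pvRange_toNat]
lemma pvSel_toNat (rs : List Int) (ci : Int) (fs : List (Option Int)) (r : Int) :
    pvSel rs (ci.toNat : Int) fs r → pvSel rs ci fs r := by
  have hb : ∀ i, pvBad rs ci fs i ↔ pvBad rs (ci.toNat : Int) fs i := by
    intro i; simp [pvBad, pvL_toNat rs ci]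
  have hkey : ∀ i, pvKey rs ci fs i = pvKey rs (ci.toNat : Int) fs i := by
    intro i; simp [pvKey, pvL_toNat rs ci]
  intro h
  rcases h with h | ⟨j, h1, h2, h3, h4⟩ | ⟨h1, h2, j, h3, h4, h5, h6⟩
  · exact Or.inl h
  · exact Or.inr (Or.inl ⟨j, h1, h2, (hb j).mpr h3, fun i hi hc => h4 i hi ((hb i).mp hc)⟩)
  · refine Or.inr (Or.inr ⟨fun i hi hc => h1 i hi ((hb i).mp hc), h2, j, h3, h4, ?_, ?_⟩)
    · intro i hi; rw [hkey j, hkey i]; exact h5 i hi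
    · intro i hi; rw [hkey j, hkey i]; exact h6 i hi

lemma pvSel_unique (rs : List Int) (ci : Int) (fs : List (Option Int)) {r1 r2 : Int}
    (h1 : pvSel rs ci fs r1) (h2 : pvSel rs ci fs r2) : r1 = r2 := by
  rcases h1 with ⟨hn, h1⟩ | ⟨j, hj1, hj2, hj3, hj4⟩ | ⟨ha, hne, j, hj1, hj2, hj3, hj4⟩ <;>
    rcases h2 with ⟨hn', h2⟩ | ⟨j', hj1', hj2', hj3', hj4'⟩ | ⟨ha', hne', j', hj1', hj2', hj3', hj4'⟩
  · omega
  · subst hn; simp at hj1'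
  · subst hn; exact absurd rfl hne'
  · subst hn'; simp at hj1
  · -- both least bad
    have : j = j' := by
      by_contra hne
      rcases Nat.lt_or_ge j j' with h | h
      · exact hj4' j h hj3
      · exact hj4 j' (by omega) hj3'
    omega
  · exact absurd hj3 (ha' j hj1)
  · subst hn'; exact absurd rfl hne
  · exact absurd hj3' (ha j' hj1')
  · -- both first minimisers
    have : j = j' := by
      by_contra hneq
      rcases Nat.lt_or_ge j j' with h | h
      · have := hj4' j h
        have := hj3 j' hj1'
        omega
      · have := hj4 j' (by omega)
        have := hj3' j hj1
        omega
    omega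
lemma svGoA_char (rs : List Int) (ci : Int) : ∀ (fs : List (Option Int)) (idx v o : Int),
    (∃ j : Nat, j < fs.length ∧ pvBad rs ci fs j ∧ (∀ i < j, ¬ pvBad rs ci fs i) ∧
      svGoA rs ci fs idx v o = idx + j) ∨
    ((∀ i < fs.length, ¬ pvBad rs ci fs i) ∧
      ((∃ j : Nat, j < fs.length ∧ svGoA rs ci fs idx v o = idx + j ∧ ci - pvKey rs ci fs j > o ∧
          (∀ i < fs.length, pvKey rs ci fs j ≤ pvKey rs ci fs i) ∧
          (∀ i < j, pvKey rs ci fs j < pvKey rs ci fs i)) ∨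
        (svGoA rs ci fs idx v o = v ∧ ∀ i < fs.length, ¬(ci - pvKey rs ci fs i > o)))) := by
  intro fs
  induction fs with
  | nil =>
    intro idx v o
    right
    exact ⟨by simp, Or.inr ⟨rfl, by simp⟩⟩
  | cons x t ih =>
    intro idx v o
    cases x with
    | none =>
      left
      exact ⟨0, by simp, by simp [pvBad], by omega, by simp [svGoA]⟩
    | some page =>
      have hbad0 : pvBad rs ci (some page :: t) 0 ↔ pvL rs ci page = -1 := by
        simp [pvBad]
      have hkey0 : pvKey rs ci (some page :: t) 0 = pvL rs ci page := by
        simp [pvKey]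
      by_cases hlu : pvL rs ci page = -1
      · left
        refine ⟨0, by simp, hbad0.mpr hlu, by omega, ?_⟩
        simp only [svGoA]
        rw [show svFindLast rs page (PySem.List.pyRange (ci - 1) (-1) (-1)) = pvL rs ci page from rfl]
        simp [hlu]
      · have hstep : ∀ idx' v' o', svGoA rs ci (some page :: t) idx' v' o' =
            if ci - pvL rs ci page > o' then svGoA rs ci t (idx' + 1) idx' (ci - pvL rs ci page)
            else svGoA rs ci t (idx' + 1) v' o' := by
          intro idx' v' o'
          simp only [svGoA]
          rw [show svFindLast rs page (PySem.List.pyRange (ci - 1) (-1) (-1)) = pvL rs ci page from rfl]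
          simp [hlu]
        by_cases himp : ci - pvL rs ci page > o
        · rw [hstep, if_pos himp]
          rcases ih (idx + 1) idx (ci - pvL rs ci page) with ⟨j, hj1, hj2, hj3, hj4⟩ | ⟨hnob, hrest⟩
          · left
            refine ⟨j + 1, by simpa using hj1, (pvBad_cons_succ rs ci _ t j).mpr hj2, ?_, by rw [hj4]; push_cast; ring⟩
            intro i hi
            cases i with
            | zero => rw [hbad0]; exact hlu
            | succ i' => rw [pvBad_cons_succ]; exact hj3 i' (by omega)
          · right
            refine ⟨?_, ?_⟩
            · intro i hi
              cases i with
              | zero => rw [hbad0]; exact hlu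
              | succ i' => rw [pvBad_cons_succ]; exact hnob i' (by simpa using hi)
            rcases hrest with ⟨j, hj1, hj2, hj3, hj4, hj5⟩ | ⟨hv, hno⟩
            · -- a strictly better frame exists in the tail
              left
              refine ⟨j + 1, by simpa using hj1, by rw [hj2]; push_cast; ring, ?_, ?_, ?_⟩
              · rw [pvKey_cons_succ]; omega
              · intro i hi
                cases i with
                | zero => rw [pvKey_cons_succ, hkey0]; omega
                | succ i' => rw [pvKey_cons_succ, pvKey_cons_succ]; exact hj4 i' (by simpa using hi)
              · intro i hi
                cases i with
                | zero => rw [pvKey_cons_succ, hkey0]; omega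
                | succ i' => rw [pvKey_cons_succ, pvKey_cons_succ]; exact hj5 i' (by omega)
            · -- the head is the first minimiser
              left
              refine ⟨0, by simp, by rw [hv]; ring, by rw [hkey0]; omega, ?_, by omega⟩
              intro i hi
              cases i with
              | zero => omega
              | succ i' =>
                rw [hkey0, pvKey_cons_succ]
                have := hno i' (by simpa using hi)
                omega
        · rw [hstep, if_neg himp]
          rcases ih (idx + 1) v o with ⟨j, hj1, hj2, hj3, hj4⟩ | ⟨hnob, hrest⟩
          · left
            refine ⟨j + 1, by simpa using hj1, (pvBad_cons_succ rs ci _ t j).mpr hj2, ?_, by rw [hj4]; push_cast; ring⟩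
            intro i hi
            cases i with
            | zero => rw [hbad0]; exact hlu
            | succ i' => rw [pvBad_cons_succ]; exact hj3 i' (by omega)
          · right
            refine ⟨?_, ?_⟩
            · intro i hi
              cases i with
              | zero => rw [hbad0]; exact hlu
              | succ i' => rw [pvBad_cons_succ]; exact hnob i' (by simpa using hi)
            rcases hrest with ⟨j, hj1, hj2, hj3, hj4, hj5⟩ | ⟨hv, hno⟩
            · left
              refine ⟨j + 1, by simpa using hj1, by rw [hj2]; push_cast; ring, ?_, ?_, ?_⟩
              · rw [pvKey_cons_succ]; omega
              · intro i hi
                cases i with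
                | zero => rw [pvKey_cons_succ, hkey0]; omega
                | succ i' => rw [pvKey_cons_succ, pvKey_cons_succ]; exact hj4 i' (by simpa using hi)
              · intro i hi
                cases i with
                | zero => rw [pvKey_cons_succ, hkey0]; omega
                | succ i' => rw [pvKey_cons_succ, pvKey_cons_succ]; exact hj5 i' (by omega)
            · right
              refine ⟨hv, ?_⟩
              intro i hi
              cases i with
              | zero => rw [hkey0]; omega
              | succ i' => rw [pvKey_cons_succ]; exact hno i' (by simpa using hi)

lemma select_victim_sel (frames : List (Option Int)) (rs : List Int) (ci : Int)
    (hci : ci ≤ (rs.length : Int)) : pvSel rs ci frames (select_victim frames rs ci) := by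
  unfold select_victim
  rcases svGoA_char rs ci frames 0 0 (-1) with ⟨j, hj1, hj2, hj3, hj4⟩ | ⟨hnob, hrest⟩
  · exact Or.inr (Or.inl ⟨j, hj1, by omega, hj2, hj3⟩)
  · rcases hrest with ⟨j, hj1, hj2, hj3, hj4, hj5⟩ | ⟨hv, hno⟩
    · refine Or.inr (Or.inr ⟨hnob, by intro h; subst h; simp at hj1, j, hj1, by omega, hj4, hj5⟩)
    · -- no improvement over -1 is impossible for a nonempty, bad-free frame list
      cases frames with
      | nil => exact Or.inl ⟨rfl, hv⟩
      | cons x t =>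
        exfalso
        have hb := hnob 0 (by simp)
        have hk := hno 0 (by simp)
        rcases hx : x with _ | p
        · exact hb (by simp [pvBad, hx])
        · have hlu : pvL rs ci p ≠ -1 := by
            intro h
            exact hb (by simp [pvBad, hx, h])
          rcases pvL_cases rs hci p with h | ⟨i, hi1, hi2, hi3⟩
          · exact hlu h
          · have : pvKey rs ci (x :: t) 0 = pvL rs ci p := by simp [pvKey, hx]
            rw [this, hi2] at hk
            omega
def svStep (st : PySem.Dict Int Int × Option Int) (pr : Int × Option Int) :
    PySem.Dict Int Int × Option Int :=
  match pr.2 with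
  | none => (st.1, if st.2 = none then some pr.1 else st.2)
  | some p => (st.1.setdefault p pr.1, st.2)

lemma svBuildFH_eq_enum (frames : List (Option Int)) :
    svBuildFH frames = (PySem.List.enumerate frames).foldl svStep (PySem.Dict.empty, none) := by
  rw [PySem.List.enumerate_eq_map_pyRange frames none, List.foldl_map,
    PySem.List.len_eq]
  rfl

lemma pvOptShift (o : Option Nat) (s : Int) :
    Option.map (fun j : Nat => s + (j : Int)) (Option.map (fun i => i + 1) o) =
    Option.map (fun j : Nat => s + 1 + (j : Int)) o := by
  cases o <;> simp
  push_cast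
  ring

lemma svBuildAux_char (fs : List (Option Int)) : ∀ (s : Int) (d : PySem.Dict Int Int) (nf : Option Int),
    (∀ p : Int, ((PySem.List.enumerate fs s).foldl svStep (d, nf)).1.get? p =
      match d.get? p with
      | some v => some v
      | none => Option.map (fun j : Nat => s + (j : Int)) (fs.findIdx? (· == some p))) ∧
    (((PySem.List.enumerate fs s).foldl svStep (d, nf)).2 =
      match nf with
      | some x => some x
      | none => Option.map (fun j : Nat => s + (j : Int)) (fs.findIdx? (· == none))) ∧
    (d.keys.Nodup → ((PySem.List.enumerate fs s).foldl svStep (d, nf)).1.keys.Nodup) := by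
  induction fs with
  | nil =>
    intro s d nf
    refine ⟨fun p => ?_, ?_, fun h => by simpa [PySem.List.enumerate_nil] using h⟩
    · simp [PySem.List.enumerate_nil]
      cases d.get? p <;> simp
    · simp [PySem.List.enumerate_nil]
      cases nf <;> simp
  | cons x t ih =>
    intro s d nf
    rw [PySem.List.enumerate_cons]
    cases x with
    | none =>
      have hstep : svStep (d, nf) (s, none) = (d, if nf = none then some s else nf) := rfl
      simp only [List.foldl_cons, hstep]
      obtain ⟨ih1, ih2, ih3⟩ := ih (s + 1) d (if nf = none then some s else nf)
      refine ⟨fun p => ?_, ?_, ih3⟩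
      · rw [ih1 p]
        cases d.get? p with
        | some v => rfl
        | none =>
          simp only [List.findIdx?_cons]
          have : ((none : Option Int) == some p) = false := by simp
          rw [this]
          simp only [Bool.false_eq_true, if_false]
          rw [pvOptShift]
      · rw [ih2]
        cases nf with
        | some y => simp
        | none =>
          simp only [if_pos rfl]
          simp [List.findIdx?_cons]
    | some q =>
      have hstep : svStep (d, nf) (s, some q) = (d.setdefault q s, nf) := rfl
      simp only [List.foldl_cons, hstep]
      obtain ⟨ih1, ih2, ih3⟩ := ih (s + 1) (d.setdefault q s) nf
      refine ⟨fun p => ?_, ?_, fun hnd => ?_⟩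
      · rw [ih1 p]
        by_cases hpq : p = q
        · subst hpq
          rw [PySem.Dict.get?_setdefault_self]
          cases hg : d.get? p with
          | some v => simp [hg]
          | none =>
            simp [hg, List.findIdx?_cons]
        · rw [PySem.Dict.get?_setdefault_of_ne d s hpq]
          cases hg : d.get? p with
          | some v => rfl
          | none =>
            simp only [List.findIdx?_cons]
            have : ((some q : Option Int) == some p) = false := by
              simp; exact fun h => hpq h.symm
            rw [this]
            simp only [Bool.false_eq_true, if_false]
            rw [pvOptShift]
      · rw [ih2]
        cases nf with
        | some y => rfl
        | none =>
          simp only [List.findIdx?_cons]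
          have : ((some q : Option Int) == none) = false := by simp
          rw [this]
          simp only [Bool.false_eq_true, if_false]
          rw [pvOptShift]
      · apply ih3
        rw [PySem.Dict.keys_setdefault]
        split
        · exact hnd
        · next hc =>
          have : q ∉ d.keys := by
            intro hmem
            rw [PySem.Dict.contains_iff_mem_keys] at hc
            simp [hmem] at hc
          simp [List.nodup_append, hnd, this]
          exact fun a ha h => this (h ▸ ha)

lemma svBuildFH_get? (frames : List (Option Int)) (p : Int) :
    (svBuildFH frames).1.get? p = Option.map (fun j : Nat => (j : Int)) (frames.findIdx? (· == some p)) := by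
  rw [svBuildFH_eq_enum]
  obtain ⟨h1, _, _⟩ := svBuildAux_char frames 0 PySem.Dict.empty none
  rw [h1 p, PySem.Dict.get?_empty]
  simp

lemma svBuildFH_nf (frames : List (Option Int)) :
    (svBuildFH frames).2 = Option.map (fun j : Nat => (j : Int)) (frames.findIdx? (· == none)) := by
  rw [svBuildFH_eq_enum]
  obtain ⟨_, h2, _⟩ := svBuildAux_char frames 0 PySem.Dict.empty none
  rw [h2]
  simp

lemma svBuildFH_nodup (frames : List (Option Int)) : (svBuildFH frames).1.keys.Nodup := by
  rw [svBuildFH_eq_enum]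
  obtain ⟨_, _, h3⟩ := svBuildAux_char frames 0 PySem.Dict.empty none
  exact h3 (by simp [PySem.Dict.nodup_keys_empty])
lemma find?_filter_ne (l : List (Int × Int)) (p q : Int) (h : q ≠ p) :
    (l.filter (fun pr => !(pr.1 == p))).find? (fun pr => pr.1 == q) = l.find? (fun pr => pr.1 == q) := by
  induction l with
  | nil => rfl
  | cons x t ih =>
    by_cases hx : x.1 = p
    · have h1 : (!(x.1 == p)) = false := by simp [hx]
      have h2 : (x.1 == q) = false := by simp [hx]; exact fun hq => h hq.symm
      simp [List.filter_cons, h1, List.find?_cons, h2, ih]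
    · have h1 : (!(x.1 == p)) = true := by simp [hx]
      simp only [List.filter_cons, h1, if_pos rfl, List.find?_cons]
      by_cases h2 : x.1 = q
      · simp [h2]
      · have : (x.1 == q) = false := by simp [h2]
        simp [this, ih]

lemma dict_get?_erase_of_ne (d : PySem.Dict Int Int) {p q : Int} (h : q ≠ p) :
    (d.erase p).get? q = d.get? q := by
  show Option.map _ (List.find? _ _) = Option.map _ (List.find? _ _)
  rw [show (PySem.Dict.erase d p).items = d.items.filter (fun pr => !(pr.1 == p)) from rfl]
  rw [find?_filter_ne d.items p q h]

lemma dict_mem_keys_erase (d : PySem.Dict Int Int) (p q : Int) :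
    q ∈ (d.erase p).keys ↔ q ∈ d.keys ∧ q ≠ p := by
  show q ∈ (d.items.filter _).map Prod.fst ↔ q ∈ d.items.map Prod.fst ∧ q ≠ p
  simp only [List.mem_map, List.mem_filter]
  constructor
  · rintro ⟨pr, ⟨hmem, hne⟩, rfl⟩
    refine ⟨⟨pr, hmem, rfl⟩, ?_⟩
    simpa using hne
  · rintro ⟨⟨pr, hmem, rfl⟩, hne⟩
    exact ⟨pr, ⟨hmem, by simpa using hne⟩, rfl⟩

lemma svSweep_empty (rs : List Int) (idxs : List Int) (v : Int) :
    svSweep rs idxs (PySem.Dict.mk []) v = (PySem.Dict.mk [], v) := by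
  cases idxs with
  | nil => rfl
  | cons i rest => simp [svSweep, PySem.Dict.size]

lemma svSweep_items (rs : List Int) : ∀ (idxs : List Int) (d : PySem.Dict Int Int) (v : Int),
    (svSweep rs idxs d v).1 =
      PySem.Dict.mk (d.items.filter
        (fun pr => !(idxs.any (fun i => PySem.List.pyGetD rs i 0 == pr.1)))) := by
  intro idxs
  induction idxs with
  | nil =>
    intro d v
    simp [svSweep]
  | cons i rest ih =>
    intro d v
    by_cases hsz : d.size = 0
    · have hit : d.items = [] := List.length_eq_zero_iff.mp hsz
      have hd : d = PySem.Dict.mk [] := PySem.Dict.ext (by simpa using hit)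
      subst hd
      simp [svSweep, hsz]
    · have hgd : d.pop? (PySem.List.pyGetD rs i 0) =
          Option.map (fun w => (w, d.erase (PySem.List.pyGetD rs i 0)))
            (d.get? (PySem.List.pyGetD rs i 0)) := rfl
      cases hg : d.get? (PySem.List.pyGetD rs i 0) with
      | none =>
        have hnone : d.pop? (PySem.List.pyGetD rs i 0) = none := by rw [hgd, hg]; rfl
        simp only [svSweep, if_neg hsz, hnone]
        rw [ih d v]
        congr 1
        apply List.filter_congr
        intro pr hmem
        have hpr : (PySem.List.pyGetD rs i 0 == pr.1) = false := by
          rcases Bool.eq_false_or_eq_true (PySem.List.pyGetD rs i 0 == pr.1) with h | h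
          · exfalso
            have heq : PySem.List.pyGetD rs i 0 = pr.1 := beq_iff_eq.mp h
            have hne : d.get? (PySem.List.pyGetD rs i 0) ≠ none := by
              intro hn
              rw [PySem.Dict.get?_eq_none_iff_not_mem_keys] at hn
              exact hn (by
                show PySem.List.pyGetD rs i 0 ∈ d.items.map Prod.fst
                exact List.mem_map.mpr ⟨pr, hmem, heq.symm⟩)
            exact hne hg
          · exact h
        simp [List.any_cons, hpr]
      | some f =>
        have hsome : d.pop? (PySem.List.pyGetD rs i 0) =
            some (f, d.erase (PySem.List.pyGetD rs i 0)) := by rw [hgd, hg]; rfl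
        simp only [svSweep, if_neg hsz, hsome]
        rw [ih (d.erase (PySem.List.pyGetD rs i 0)) f]
        rw [show (d.erase (PySem.List.pyGetD rs i 0)).items =
            d.items.filter (fun pr => !(pr.1 == PySem.List.pyGetD rs i 0)) from rfl]
        rw [List.filter_filter]
        congr 1
        apply List.filter_congr
        intro pr _
        simp only [List.any_cons, Bool.not_or]
        have hc : (PySem.List.pyGetD rs i 0 == pr.1) = (pr.1 == PySem.List.pyGetD rs i 0) := by
          rcases eq_or_ne pr.1 (PySem.List.pyGetD rs i 0) with h | h
          · simp [h]
          · simp [h, Ne.symm h]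
        rw [hc]
        rw [Bool.and_comm]

lemma svSweep_snd (rs : List Int) : ∀ (k : Nat), k ≤ rs.length → ∀ (d : PySem.Dict Int Int) (v : Int),
    ((∀ p ∈ d.keys, pvL rs (k : Int) p = -1) ∧
      (svSweep rs (PySem.List.pyRange ((k : Int) - 1) (-1) (-1)) d v).2 = v) ∨
    (∃ p ∈ d.keys, pvL rs (k : Int) p ≠ -1 ∧
      (∀ q ∈ d.keys, pvL rs (k : Int) q ≠ -1 → pvL rs (k : Int) p ≤ pvL rs (k : Int) q) ∧
      (svSweep rs (PySem.List.pyRange ((k : Int) - 1) (-1) (-1)) d v).2 = d.getD p 0) := by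
  intro k
  induction k with
  | zero =>
    intro _ d v
    rw [PySem.List.pyRange_neg_one_eq_nil (by omega)]
    exact Or.inl ⟨fun p _ => pvL_neg rs (by omega) p, rfl⟩
  | succ n ih =>
    intro hk d v
    have hn : n < rs.length := by omega
    have hrange : PySem.List.pyRange (((n + 1 : Nat) : Int) - 1) (-1) (-1) =
        (n : Int) :: PySem.List.pyRange ((n : Int) - 1) (-1) (-1) := by
      have h1 : (((n + 1 : Nat) : Int) - 1) = (n : Int) := by push_cast; ring
      rw [h1, PySem.List.pyRange_neg_one_cons (by omega)]
    rw [hrange]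
    have hp0 : PySem.List.pyGetD rs (n : Int) 0 = rs[n] := by
      rw [PySem.List.pyGetD_eq_getElem rs 0 (by omega) (by exact_mod_cast hn)]
      simp
    have hLsucc : ∀ p, pvL rs ((n + 1 : Nat) : Int) p =
        if rs[n] = p then (n : Int) else pvL rs (n : Int) p := by
      intro p
      have := pvL_succ rs n hn p
      push_cast
      push_cast at this
      exact this
    by_cases hsz : d.size = 0
    · have hit : d.items = [] := List.length_eq_zero_iff.mp hsz
      have hkeys : d.keys = [] := by
        show d.items.map Prod.fst = []
        rw [hit]; rfl
      left
      refine ⟨fun p hp => by simp [hkeys] at hp, ?_⟩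
      simp [svSweep, hsz]
    · have hgd : d.pop? (PySem.List.pyGetD rs (n : Int) 0) =
          Option.map (fun w => (w, d.erase (PySem.List.pyGetD rs (n : Int) 0)))
            (d.get? (PySem.List.pyGetD rs (n : Int) 0)) := rfl
      cases hg : d.get? (PySem.List.pyGetD rs (n : Int) 0) with
      | none =>
        have hnone : d.pop? (PySem.List.pyGetD rs (n : Int) 0) = none := by rw [hgd, hg]; rfl
        have hnm : rs[n] ∉ d.keys := by
          rw [hp0] at hg
          exact (PySem.Dict.get?_eq_none_iff_not_mem_keys d rs[n]).mp hg
        have hLkeep : ∀ q ∈ d.keys, pvL rs ((n + 1 : Nat) : Int) q = pvL rs (n : Int) q := by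
          intro q hq
          rw [hLsucc q, if_neg (fun h => hnm (by rwa [h]))]
        simp only [svSweep, if_neg hsz, hnone]
        rcases ih (by omega) d v with ⟨h1, h2⟩ | ⟨p, hp1, hp2, hp3, hp4⟩
        · left
          exact ⟨fun p hp => by rw [hLkeep p hp]; exact h1 p hp, h2⟩
        · right
          refine ⟨p, hp1, by rw [hLkeep p hp1]; exact hp2, ?_, hp4⟩
          intro q hq hqne
          rw [hLkeep p hp1, hLkeep q hq]
          exact hp3 q hq (by rw [← hLkeep q hq]; exact hqne)
      | some f =>
        have hsome : d.pop? (PySem.List.pyGetD rs (n : Int) 0) =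
            some (f, d.erase (PySem.List.pyGetD rs (n : Int) 0)) := by rw [hgd, hg]; rfl
        rw [hp0] at hg hsome
        have hmem : rs[n] ∈ d.keys := by
          by_contra hnm
          rw [← PySem.Dict.get?_eq_none_iff_not_mem_keys] at hnm
          rw [hg] at hnm
          simp at hnm
        have hLp0 : pvL rs ((n + 1 : Nat) : Int) rs[n] = (n : Int) := by
          rw [hLsucc rs[n], if_pos rfl]
        have hLkeep : ∀ q, q ≠ rs[n] → pvL rs ((n + 1 : Nat) : Int) q = pvL rs (n : Int) q := by
          intro q hq
          rw [hLsucc q, if_neg (fun h => hq h.symm)]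
        simp only [svSweep, if_neg hsz, hp0, hsome]
        rcases ih (by omega) (d.erase rs[n]) f with ⟨h1, h2⟩ | ⟨p, hp1, hp2, hp3, hp4⟩
        · -- everything else is unused: rs[n]'s frame is the victim
          right
          refine ⟨rs[n], hmem, by rw [hLp0]; omega, ?_, ?_⟩
          · intro q hq hqne
            by_cases hqe : q = rs[n]
            · subst hqe; omega
            · exfalso
              have hqk : q ∈ (d.erase rs[n]).keys := (dict_mem_keys_erase d rs[n] q).mpr ⟨hq, hqe⟩
              have := h1 q hqk
              rw [hLkeep q hqe] at hqne
              exact hqne this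
          · rw [h2, PySem.Dict.getD_eq_get?_getD, hg]; rfl
        · -- the tail sweep pops a page with an even smaller last use
          right
          have hpne : p ≠ rs[n] := ((dict_mem_keys_erase d rs[n] p).mp hp1).2
          have hpk : p ∈ d.keys := ((dict_mem_keys_erase d rs[n] p).mp hp1).1
          refine ⟨p, hpk, by rw [hLkeep p hpne]; exact hp2, ?_, ?_⟩
          · intro q hq hqne
            by_cases hqe : q = rs[n]
            · subst hqe
              rw [hLp0, hLkeep p hpne]
              rcases pvL_cases_nat rs n (by omega) p with h | ⟨i, hi1, hi2, _⟩
              · exact absurd h hp2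
              · omega
            · have hqk : q ∈ (d.erase rs[n]).keys := (dict_mem_keys_erase d rs[n] q).mpr ⟨hq, hqe⟩
              rw [hLkeep p hpne, hLkeep q hqe]
              exact hp3 q hqk (by rw [← hLkeep q hqe]; exact hqne)
          · rw [hp4, PySem.Dict.getD_eq_get?_getD, PySem.Dict.getD_eq_get?_getD,
              dict_get?_erase_of_ne d hpne]
lemma any_range_iff (rs : List Int) {ci : Int} (hci : ci ≤ (rs.length : Int)) (p : Int) :
    ((PySem.List.pyRange (ci - 1) (-1) (-1)).any (fun i => PySem.List.pyGetD rs i 0 == p)) = true ↔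
      pvL rs ci p ≠ -1 := by
  rw [List.any_eq_true]
  constructor
  · rintro ⟨i, hmem, hbeq⟩
    rw [PySem.List.mem_pyRange_neg_one] at hmem
    have h0 : 0 ≤ i := by omega
    have h1 : i < (rs.length : Int) := by omega
    have hget : PySem.List.pyGetD rs i 0 = rs[i.toNat] := PySem.List.pyGetD_eq_getElem rs 0 h0 h1
    have hp : rs[i.toNat] = p := by rw [← hget]; exact beq_iff_eq.mp hbeq
    have hgi : rs[i.toNat]? = some p := by
      rw [List.getElem?_eq_getElem (by omega), hp]
    have := pvL_ge rs hci (i := i.toNat) (by omega) hgi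
    omega
  · intro h
    rcases pvL_cases rs hci p with h' | ⟨i, hi1, hi2, hi3⟩
    · exact absurd h' h
    · have hlen : i < rs.length := by
        by_contra hge
        rw [List.getElem?_eq_none (by omega)] at hi3
        simp at hi3
      refine ⟨(i : Int), ?_, ?_⟩
      · rw [PySem.List.mem_pyRange_neg_one]; omega
      · have hget : PySem.List.pyGetD rs (i : Int) 0 = rs[i] := by
          rw [PySem.List.pyGetD_eq_getElem rs 0 (by omega) (by exact_mod_cast hlen)]
          simp
        rw [hget]
        have : rs[i] = p := by
          rw [List.getElem?_eq_getElem hlen] at hi3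
          exact Option.some.inj hi3
        simp [this]

lemma selAlt_def (frames : List (Option Int)) (rs : List Int) (ci : Int) :
    select_victim_alt frames rs ci =
      (match PySem.List.min?
          ((svSweep rs (PySem.List.pyRange (min ci (rs.length : Int) - 1) (-1) (-1))
              (svBuildFH frames).1 0).1.values ++
            (match (svBuildFH frames).2 with | none => ([] : List Int) | some f => [f]))
          (fun x => x) with
       | some m => m
       | none =>
         (svSweep rs (PySem.List.pyRange (min ci (rs.length : Int) - 1) (-1) (-1))
             (svBuildFH frames).1 0).2) := rfl

lemma selAlt_nil (rs : List Int) (ci : Int) : select_victim_alt [] rs ci = 0 := by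
  rw [selAlt_def]
  have hb : svBuildFH [] = (PySem.Dict.mk [], none) := rfl
  rw [hb]
  rw [svSweep_empty]
  rfl

-- every value stored in the first-holder dictionary is a (nonnegative) frame index
lemma svBuildFH_val (frames : List (Option Int)) {p x : Int}
    (h : (svBuildFH frames).1.get? p = some x) :
    ∃ j : Nat, x = (j : Int) ∧ j < frames.length ∧ frames[j]? = some (some p) ∧
      ∀ i < j, frames[i]? ≠ some (some p) := by
  rw [svBuildFH_get?] at h
  cases hf : frames.findIdx? (· == some p) with
  | none => rw [hf] at h; simp at h
  | some j =>
    rw [hf] at h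
    obtain ⟨hlt, hj, hmin⟩ := List.findIdx?_eq_some_iff_getElem.mp hf
    refine ⟨j, by simpa using h.symm, hlt, ?_, ?_⟩
    · rw [List.getElem?_eq_getElem hlt]
      have := beq_iff_eq.mp hj
      rw [this]
    · intro i hi hcon
      have hilt : i < frames.length := by omega
      rw [List.getElem?_eq_getElem hilt] at hcon
      have : frames[i] = some p := Option.some.inj hcon
      exact hmin i hi (by simp [this])

-- a survivor is the first holder of a never-referenced page, or the first empty frame
lemma surv_mem (frames : List (Option Int)) (rs : List Int) {ci : Int}
    (hci : ci ≤ (rs.length : Int)) {x : Int}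
    (hx : x ∈ (svSweep rs (PySem.List.pyRange (ci - 1) (-1) (-1)) (svBuildFH frames).1 0).1.values ++
      (match (svBuildFH frames).2 with | none => ([] : List Int) | some f => [f])) :
    ∃ j : Nat, x = (j : Int) ∧ j < frames.length ∧ pvBad rs ci frames j := by
  rw [List.mem_append] at hx
  rcases hx with hx | hx
  · -- from the surviving dictionary values
    rcases List.mem_map.mp hx with ⟨pr, hpr, rfl⟩
    rw [svSweep_items] at hpr
    have hpr' : pr ∈ (svBuildFH frames).1.items.filter
        (fun pr => !((PySem.List.pyRange (ci - 1) (-1) (-1)).any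
          (fun i => PySem.List.pyGetD rs i 0 == pr.1))) := hpr
    rw [List.mem_filter] at hpr'
    obtain ⟨hmem, hpred⟩ := hpr'
    have hget : (svBuildFH frames).1.get? pr.1 = some pr.2 :=
      PySem.Dict.get?_of_mem_items _ (by exact hmem) (svBuildFH_nodup frames)
    obtain ⟨j, hj1, hj2, hj3, _⟩ := svBuildFH_val frames hget
    refine ⟨j, hj1, hj2, ?_⟩
    right
    have hpage : pvPage frames j = some pr.1 := by simp [pvPage, hj3]
    rw [hpage]
    have : ¬ pvL rs ci pr.1 ≠ -1 := by
      rw [← any_range_iff rs hci pr.1]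
      simp only [Bool.not_eq_true]
      simpa using hpred
    simpa using this
  · -- the first empty frame
    have hnf : (svBuildFH frames).2 = some x := by
      cases hc : (svBuildFH frames).2 with
      | none => rw [hc] at hx; simp at hx
      | some f => rw [hc] at hx; simp at hx; rw [hx]
    rw [svBuildFH_nf] at hnf
    cases hf : frames.findIdx? (· == none) with
    | none => rw [hf] at hnf; simp at hnf
    | some j =>
      rw [hf] at hnf
      obtain ⟨hlt, hj, _⟩ := List.findIdx?_eq_some_iff_getElem.mp hf
      refine ⟨j, by simpa using hnf.symm, hlt, ?_⟩
      left
      have : frames[j] = none := beq_iff_eq.mp hj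
      simp [pvPage, List.getElem?_eq_getElem hlt, this]
lemma selAlt_head_none (t : List (Option Int)) (rs : List Int) (ci : Int) :
    select_victim_alt (none :: t) rs ci = 0 := by
  rw [selAlt_def]
  have hnf : (svBuildFH (none :: t)).2 = some 0 := by
    rw [svBuildFH_nf]
    simp [List.findIdx?_cons]
  rw [hnf]
  have h0mem : (0 : Int) ∈
      (svSweep rs (PySem.List.pyRange (min ci ((rs.length : Int)) - 1) (-1) (-1))
        (svBuildFH (none :: t)).1 0).1.values ++ [(0 : Int)] := by
    simp
  cases hm : PySem.List.min?
      ((svSweep rs (PySem.List.pyRange (min ci ((rs.length : Int)) - 1) (-1) (-1))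
          (svBuildFH (none :: t)).1 0).1.values ++ [(0 : Int)]) (fun x => x) with
  | none =>
    exfalso
    rw [PySem.List.min?_eq_none_iff] at hm
    rw [hm] at h0mem
    simp at h0mem
  | some m =>
    have hle : m ≤ 0 := PySem.List.min?_isMin hm 0 h0mem
    have hmem := PySem.List.min?_mem hm
    rw [List.mem_append] at hmem
    rcases hmem with hmem | hmem
    · rcases List.mem_map.mp hmem with ⟨pr, hpr, rfl⟩
      rw [svSweep_items] at hpr
      rw [List.mem_filter] at hpr
      have hget : (svBuildFH (none :: t)).1.get? pr.1 = some pr.2 :=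
        PySem.Dict.get?_of_mem_items _ (by exact hpr.1) (svBuildFH_nodup _)
      obtain ⟨j, hj1, _, _, _⟩ := svBuildFH_val _ hget
      simp only []
      omega
    · simp at hmem
      simp [hmem]

lemma select_victim_alt_sel_nat (frames : List (Option Int)) (rs : List Int) (k : Nat)
    (hk : k ≤ rs.length) : pvSel rs (k : Int) frames (select_victim_alt frames rs (k : Int)) := by
  by_cases hfe : frames = []
  · subst hfe
    rw [selAlt_nil]
    exact Or.inl ⟨rfl, rfl⟩
  have hci : (k : Int) ≤ (rs.length : Int) := by exact_mod_cast hk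
  have hmin : min (k : Int) (rs.length : Int) = (k : Int) := min_eq_left hci
  rw [selAlt_def, hmin]
  by_cases hex : ∃ j : Nat, j < frames.length ∧ pvBad rs (k : Int) frames j
  · -- some frame is empty or never referenced: the first such frame wins
    haveI : DecidablePred (fun j => j < frames.length ∧ pvBad rs (k : Int) frames j) :=
      fun j => by unfold pvBad; infer_instance
    set jb := Nat.find hex with hjbdef
    obtain ⟨hjblt, hjbbad⟩ := Nat.find_spec hex
    have hjbmin : ∀ i < jb, ¬ pvBad rs (k : Int) frames i := by
      intro i hi hbad
      exact Nat.find_min hex hi ⟨by omega, hbad⟩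
    have hgetjb : frames[jb]? = some (frames[jb]) := List.getElem?_eq_getElem hjblt
    have hjbsurv : (jb : Int) ∈
        (svSweep rs (PySem.List.pyRange ((k : Int) - 1) (-1) (-1)) (svBuildFH frames).1 0).1.values ++
          (match (svBuildFH frames).2 with | none => ([] : List Int) | some f => [f]) := by
      cases hpp : frames[jb] with
      | none =>
        -- jb is the first empty frame, so it is recorded in nf
        have hfi : frames.findIdx? (· == none) = some jb := by
          rw [List.findIdx?_eq_some_iff_getElem]
          refine ⟨hjblt, by simp [hpp], ?_⟩
          intro i hi hcon
          have hilt : i < frames.length := by omega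
          apply hjbmin i hi
          left
          have : frames[i] = none := by simpa using hcon
          simp [pvPage, List.getElem?_eq_getElem hilt, this]
        have hnf : (svBuildFH frames).2 = some (jb : Int) := by
          rw [svBuildFH_nf, hfi]; rfl
        rw [List.mem_append, hnf]
        right
        simp
      | some p =>
        -- jb is the first holder of the never-referenced page p
        have hpage : pvPage frames jb = some p := by simp [pvPage, hgetjb, hpp]
        have hLp : pvL rs (k : Int) p = -1 := by
          rcases hjbbad with hb | hb
          · rw [hpage] at hb; simp at hb
          · rw [hpage] at hb; simpa using hb
        have hfi : frames.findIdx? (· == some p) = some jb := by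
          rw [List.findIdx?_eq_some_iff_getElem]
          refine ⟨hjblt, by simp [hpp], ?_⟩
          intro i hi hcon
          have hilt : i < frames.length := by omega
          apply hjbmin i hi
          right
          have : frames[i] = some p := by simpa using hcon
          simp [pvPage, List.getElem?_eq_getElem hilt, this, hLp]
        have hget : (svBuildFH frames).1.get? p = some (jb : Int) := by
          rw [svBuildFH_get?, hfi]; rfl
        rw [List.mem_append]
        left
        have hpr : (p, (jb : Int)) ∈ (svBuildFH frames).1.items :=
          PySem.Dict.mem_items_of_get?_eq_some _ hget
        rw [svSweep_items]
        show ((jb : Int)) ∈ List.map Prod.snd _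
        refine List.mem_map.mpr ⟨(p, (jb : Int)), ?_, rfl⟩
        rw [List.mem_filter]
        refine ⟨hpr, ?_⟩
        have : ¬ ((PySem.List.pyRange ((k : Int) - 1) (-1) (-1)).any
            (fun i => PySem.List.pyGetD rs i 0 == p)) = true := by
          rw [any_range_iff rs hci p]
          simp [hLp]
        simpa using this
    cases hm : PySem.List.min?
        ((svSweep rs (PySem.List.pyRange ((k : Int) - 1) (-1) (-1)) (svBuildFH frames).1 0).1.values ++
          (match (svBuildFH frames).2 with | none => ([] : List Int) | some f => [f]))
        (fun x => x) with
    | none =>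
      exfalso
      rw [PySem.List.min?_eq_none_iff] at hm
      rw [hm] at hjbsurv
      simp at hjbsurv
    | some m =>
      have hle : m ≤ (jb : Int) := PySem.List.min?_isMin hm _ hjbsurv
      obtain ⟨jm, hm1, hm2, hm3⟩ := surv_mem frames rs hci (PySem.List.min?_mem hm)
      have hjmge : jb ≤ jm := by
        by_contra hlt
        exact hjbmin jm (by omega) hm3
      have hmjb : m = (jb : Int) := by omega
      simp only []
      rw [hmjb]
      exact Or.inr (Or.inl ⟨jb, hjblt, rfl, hjbbad, hjbmin⟩)
  · -- no empty and no never-referenced frame: the first minimal-last-use frame wins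
    push_neg at hex
    have hnob : ∀ j < frames.length, ¬ pvBad rs (k : Int) frames j := hex
    have hsurvnil :
        ((svSweep rs (PySem.List.pyRange ((k : Int) - 1) (-1) (-1)) (svBuildFH frames).1 0).1.values ++
          (match (svBuildFH frames).2 with | none => ([] : List Int) | some f => [f])) = [] := by
      rw [List.eq_nil_iff_forall_not_mem]
      intro x hx
      obtain ⟨jx, _, hx2, hx3⟩ := surv_mem frames rs hci hx
      exact hnob jx hx2 hx3
    rw [hsurvnil]
    have hmn : PySem.List.min? ([] : List Int) (fun x => x) = none := rfl
    rw [hmn]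
    simp only []
    rcases svSweep_snd rs k hk (svBuildFH frames).1 0 with ⟨h1, h2⟩ | ⟨p, hpmem, hpne, hpmin, heq⟩
    · -- impossible: the first frame holds a referenced page
      exfalso
      cases hfr : frames with
      | nil => exact hfe hfr
      | cons f0 t =>
        subst hfr
        have hb0 := hnob 0 (by simp)
        cases hf0 : f0 with
        | none => exact hb0 (by left; simp [pvPage, hf0])
        | some p0 =>
          have hL0 : pvL rs (k : Int) p0 ≠ -1 := by
            intro h
            exact hb0 (by right; simp [pvPage, hf0, h])
          have hfi : (f0 :: t).findIdx? (· == some p0) ≠ none := by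
            intro hc
            rw [List.findIdx?_eq_none_iff] at hc
            have := hc f0 List.mem_cons_self
            rw [hf0] at this
            simp at this
          have hmem : p0 ∈ (svBuildFH (f0 :: t)).1.keys := by
            by_contra hnm
            rw [← PySem.Dict.get?_eq_none_iff_not_mem_keys] at hnm
            rw [svBuildFH_get?] at hnm
            cases hc : (f0 :: t).findIdx? (· == some p0) with
            | none => exact hfi hc
            | some j => rw [hc] at hnm; simp at hnm
          exact hL0 (h1 p0 hmem)
    · rw [heq]
      cases hg : (svBuildFH frames).1.get? p with
      | none =>
        exfalso
        rw [PySem.Dict.get?_eq_none_iff_not_mem_keys] at hg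
        exact hg hpmem
      | some fidx =>
        obtain ⟨jh, hjhe, hjh1, hjh3, hjh4⟩ := svBuildFH_val frames hg
        have hgd : (svBuildFH frames).1.getD p 0 = (jh : Int) := by
          rw [PySem.Dict.getD_eq_get?_getD, hg, hjhe]; rfl
        rw [hgd]
        have hpagejh : pvPage frames jh = some p := by simp [pvPage, hjh3]
        have hkeyjh : pvKey rs (k : Int) frames jh = pvL rs (k : Int) p := by
          simp [pvKey, hpagejh]
        -- every frame's page is a key of the dictionary
        have hkeymem : ∀ i, i < frames.length → ∀ q, pvPage frames i = some q →
            q ∈ (svBuildFH frames).1.keys := by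
          intro i hilt q hq
          have hgi : frames[i]? = some (frames[i]) := List.getElem?_eq_getElem hilt
          have hfq : frames[i] = some q := by simpa [pvPage, hgi] using hq
          have hfi : frames.findIdx? (· == some q) ≠ none := by
            intro hc
            rw [List.findIdx?_eq_none_iff] at hc
            have := hc frames[i] (List.getElem_mem hilt)
            rw [hfq] at this
            simp at this
          by_contra hnm
          rw [← PySem.Dict.get?_eq_none_iff_not_mem_keys] at hnm
          rw [svBuildFH_get?] at hnm
          cases hc : frames.findIdx? (· == some q) with
          | none => exact hfi hc
          | some j => rw [hc] at hnm; simp at hnm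
        have hpages : ∀ i, i < frames.length →
            ∃ q, pvPage frames i = some q ∧ pvL rs (k : Int) q ≠ -1 := by
          intro i hilt
          have hb := hnob i hilt
          cases hpi : pvPage frames i with
          | none => exact absurd (Or.inl hpi) hb
          | some q =>
            refine ⟨q, rfl, ?_⟩
            intro hL
            exact hb (Or.inr (by rw [hpi]; simpa using hL))
        refine Or.inr (Or.inr ⟨hnob, hfe, jh, hjh1, rfl, ?_, ?_⟩)
        · intro i hilt
          obtain ⟨q, hq1, hq2⟩ := hpages i hilt
          have hqk : q ∈ (svBuildFH frames).1.keys := hkeymem i hilt q hq1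
          have : pvKey rs (k : Int) frames i = pvL rs (k : Int) q := by simp [pvKey, hq1]
          rw [hkeyjh, this]
          exact hpmin q hqk hq2
        · intro i hilt
          obtain ⟨q, hq1, hq2⟩ := hpages i (by omega)
          have hqk : q ∈ (svBuildFH frames).1.keys := hkeymem i (by omega) q hq1
          have hkeyi : pvKey rs (k : Int) frames i = pvL rs (k : Int) q := by simp [pvKey, hq1]
          rw [hkeyjh, hkeyi]
          have hqnep : q ≠ p := by
            intro hqp
            subst hqp
            have hgi : frames[i]? = some (frames[i]) := List.getElem?_eq_getElem (by omega)
            have : frames[i] = some q := by simpa [pvPage, hgi] using hq1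
            exact hjh4 i hilt (by rw [hgi, this])
          have hne : pvL rs (k : Int) q ≠ pvL rs (k : Int) p := by
            intro h
            exact hqnep (pvL_inj rs hci hq2 hpne h)
          have hle := hpmin q hqk hq2
          omega

lemma select_victim_alt_sel (frames : List (Option Int)) (rs : List Int) (ci : Int)
    (hci : ci ≤ (rs.length : Int)) : pvSel rs ci frames (select_victim_alt frames rs ci) := by
  have htn : (ci.toNat : Int) ≤ (rs.length : Int) := by omega
  have heq : select_victim_alt frames rs ci = select_victim_alt frames rs (ci.toNat : Int) := by
    rw [selAlt_def, selAlt_def, min_eq_left hci, min_eq_left htn]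
    have : PySem.List.pyRange (ci - 1) (-1) (-1) =
        PySem.List.pyRange ((ci.toNat : Int) - 1) (-1) (-1) := pvRange_toNat ci
    rw [this]
  rw [heq]
  exact pvSel_toNat rs ci frames _ (select_victim_alt_sel_nat frames rs ci.toNat (by omega))

-- ===== VERDICT (by name: the statement is the Claim_ definition above) =====
theorem select_victim_spec : Claim_equal_select_victim := by
  intro frames rs ci _ hPre
  unfold Spec_select_victim
  by_cases hci : ci ≤ (rs.length : Int)
  · exact pvSel_unique rs ci frames (select_victim_sel frames rs ci hci)
      (select_victim_alt_sel frames rs ci hci)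
  · rcases hPre with h | h | h
    · exact absurd h hci
    · subst h; rw [selAlt_nil]; rfl
    · cases frames with
      | nil => rw [selAlt_nil]; rfl
      | cons hd t =>
        simp at h; subst h
        rw [selAlt_head_none]; rfl
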